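-- pv_equiv track=rewrite | github.com/mattecasu/wordcloud | my-wordcloud/utils.py | strip_list
-- ===== SOURCE A (Python) =====
-- def strip_list(l, stopwords):
--     while l and (l[-1] in stopwords or l[-1].isnumeric()):
--         l.pop()
--     l.reverse()
--     while l and (l[-1] in stopwords or l[-1].isnumeric()):
--         l.pop()
--     l.reverse()
--     return l
-- ===== SOURCE B (Python) =====
-- def strip_list(l, stopwords):
--     # One forward pass with a stopword set built once: good words go to res;
--     # bad words after the first good word are buffered in pending and flushed
--     # only when another good word follows, so leading and trailing bad runs
--     # are dropped.  Mutates l in place via l[:] = res, like the original.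
--     stop = set(stopwords)
--     res = []
--     pending = []
--     for w in l:
--         if w in stop or w.isnumeric():
--             if res:
--                 pending.append(w)
--         else:
--             res.extend(pending)
--             pending.clear()
--             res.append(w)
--     l[:] = res
--     return l
-- ===== Notes on version B (the rewrite author's own statement) =====
-- stated objective: simpler
-- what changed: Replaces the pop-from-end / reverse / pop / reverse dance with a single forward pass (with the stopwords put in a set once) that buffers interior bad runs and drops leading/trailing ones.
import Mathlib
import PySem

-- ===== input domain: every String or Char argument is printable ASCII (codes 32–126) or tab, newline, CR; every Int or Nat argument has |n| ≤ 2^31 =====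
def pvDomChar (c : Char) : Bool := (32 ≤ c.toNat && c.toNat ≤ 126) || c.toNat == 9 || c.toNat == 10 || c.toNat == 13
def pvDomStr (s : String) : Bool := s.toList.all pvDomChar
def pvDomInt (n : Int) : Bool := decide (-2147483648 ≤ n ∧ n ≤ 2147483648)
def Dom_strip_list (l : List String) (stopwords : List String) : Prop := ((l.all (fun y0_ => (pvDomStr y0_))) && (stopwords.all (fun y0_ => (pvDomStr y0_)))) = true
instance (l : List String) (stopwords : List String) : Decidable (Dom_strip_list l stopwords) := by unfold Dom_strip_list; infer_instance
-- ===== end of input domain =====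

-- B replaces A's pop/reverse/pop/reverse with a single forward pass (simpler);
-- both mutate l in place and return it, the equivalence proved is about the return value.
-- `w in stopwords or w.isnumeric()`; strIsdigit is exact for isnumeric on the ASCII domain.
def pvBad (stopwords : List String) (w : String) : Bool :=
  stopwords.contains w || PySem.Str.strIsdigit w

-- ===== PORT A =====
-- `while l and (l[-1] in stopwords or l[-1].isnumeric()): l.pop()`
def stripEndA (stopwords : List String) (l : List String) : List String :=
  if h : l.isEmpty then l
  else if pvBad stopwords (l.getLast (by simpa [List.isEmpty_iff] using h)) then
    stripEndA stopwords l.dropLast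
  else l
termination_by l.length
decreasing_by
  have hne : l ≠ [] := by simpa [List.isEmpty_iff] using h
  have := List.length_pos_of_ne_nil hne
  rw [List.length_dropLast]
  omega

def strip_list (l : List String) (stopwords : List String) : List String :=
  let r1 := stripEndA stopwords l
  let r2 := r1.reverse
  let r3 := stripEndA stopwords r2
  r3.reverse

-- ===== PORT B =====
-- B builds `stop = set(stopwords)` once and tests `w in stop or w.isnumeric()`
def pvBadSet (stop : PySem.Set String) (w : String) : Bool :=
  PySem.Set.contains stop w || PySem.Str.strIsdigit w

-- loop body of B's single pass over the words, state = (res, pending)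
def stepB (stop : PySem.Set String) (st : List String × List String) (w : String) :
    List String × List String :=
  if pvBadSet stop w then
    if st.1.isEmpty then st else (st.1, st.2 ++ [w])
  else (st.1 ++ st.2 ++ [w], [])

def strip_list_alt (l : List String) (stopwords : List String) : List String :=
  let stop := PySem.Set.ofList stopwords
  (l.foldl (stepB stop) ([], [])).1

-- ===== PRECONDITION & SPEC =====
def Spec_strip_list (l : List String) (stopwords : List String) (out : List String) : Prop := out = strip_list_alt l stopwords
instance (l : List String) (stopwords : List String) (out : List String) : Decidable (Spec_strip_list l stopwords out) := by unfold Spec_strip_list; infer_instance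

-- ===== CLAIM (what is proved, stated in full; the proofs are below) =====
def Claim_equal_strip_list : Prop := ∀ (l : List String) (stopwords : List String), Dom_strip_list l stopwords → Spec_strip_list l stopwords (strip_list l stopwords)

-- ===== LEMMAS AND PROOFS =====

-- strip the maximal run of p-elements from the end of a list
def rstrip (p : String → Bool) (m : List String) : List String :=
  (m.reverse.dropWhile p).reverse

theorem rstrip_concat (p : String → Bool) (xs : List String) (x : String) :
    rstrip p (xs ++ [x]) = if p x then rstrip p xs else xs ++ [x] := by
  by_cases hx : p x = true
  · simp [rstrip, hx, List.dropWhile_cons_of_pos]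
  · simp [rstrip, List.dropWhile_cons_of_neg hx, hx]

theorem stripEndA_eq (stopwords : List String) (l : List String) :
    stripEndA stopwords l = rstrip (pvBad stopwords) l := by
  induction l using List.reverseRecOn with
  | nil => rw [stripEndA.eq_def]; simp [rstrip]
  | append_singleton xs x ih =>
    rw [stripEndA.eq_def]
    have hne : ¬ (xs ++ [x]).isEmpty = true := by simp
    rw [dif_neg hne]
    have hlast : ∀ (h : xs ++ [x] ≠ []), (xs ++ [x]).getLast h = x := by
      intro h; exact List.getLast_concat
    rw [rstrip_concat]
    simp only [hlast, List.dropLast_concat]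
    split <;> simp_all

theorem rstrip_head (p : String → Bool) (x : String) (xs : List String) (hx : p x = false) :
    ∃ r', rstrip p (x :: xs) = x :: r' := by
  have hnil : List.dropWhile p (xs.reverse ++ [x]) ≠ [] := by
    intro h
    have := List.dropWhile_eq_nil_iff.mp h x (by simp)
    rw [hx] at this; exact Bool.false_ne_true this
  have hlast : (List.dropWhile p (xs.reverse ++ [x])).getLast? = some x := by
    obtain ⟨s, hs⟩ := List.dropWhile_suffix (l := xs.reverse ++ [x]) p
    have := congrArg List.getLast? hs
    rw [List.getLast?_append_of_ne_nil s hnil, List.getLast?_concat] at this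
    exact this
  have hhead : (rstrip p (x :: xs)).head? = some x := by
    simp only [rstrip, List.reverse_cons, List.head?_reverse]
    exact hlast
  exact ⟨(rstrip p (x :: xs)).tail, (List.cons_head?_tail hhead).symm⟩

theorem dropWhile_rstrip_comm (p : String → Bool) (l : List String) :
    List.dropWhile p (rstrip p l) = rstrip p (List.dropWhile p l) := by
  by_cases hnil : List.dropWhile p l = []
  · have hall : ∀ x ∈ l, p x = true := List.dropWhile_eq_nil_iff.mp hnil
    have hr : rstrip p l = [] := by
      simp only [rstrip, List.reverse_eq_nil_iff]
      exact List.dropWhile_eq_nil_iff.mpr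
        (fun x hx => hall x (List.mem_reverse.mp hx))
    rw [hr, hnil]; simp [rstrip]
  · obtain ⟨x, xs, hcons⟩ := List.exists_cons_of_ne_nil hnil
    have hx : p x = false := by
      by_contra hpx
      have hpx : p x = true := by revert hpx; cases p x <;> simp
      have : List.dropWhile p (List.dropWhile p l) = List.dropWhile p l :=
        List.dropWhile_idempotent ..
      rw [hcons, List.dropWhile_cons_of_pos hpx] at this
      have := congrArg List.length this
      have hlt := List.length_dropWhile_le p xs
      simp at this; omega
    set t := List.takeWhile p l with ht
    have hl : t ++ (x :: xs) = l := by rw [ht, ← hcons]; exact List.takeWhile_append_dropWhile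
    have htall : List.dropWhile p t = [] :=
      List.dropWhile_eq_nil_iff.mpr (fun y hy => List.mem_takeWhile_imp hy)
    -- rstrip p l = t ++ rstrip p (x :: xs)
    have hd1 : List.dropWhile p ((x :: xs).reverse) ≠ [] := by
      intro h
      have := List.dropWhile_eq_nil_iff.mp h x (by simp)
      rw [hx] at this; exact Bool.false_ne_true this
    have hsplit : rstrip p l = t ++ rstrip p (x :: xs) := by
      rw [← hl]
      simp only [rstrip, List.reverse_append, List.dropWhile_append]
      rw [if_neg (by simpa [List.isEmpty_iff] using hd1)]
      simp
    obtain ⟨r', hr'⟩ := rstrip_head p x xs hx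
    rw [hsplit, List.dropWhile_append, if_pos (by simp [htall]), hr',
      List.dropWhile_cons_of_neg (by simp [hx]), hcons, ← hr']

theorem foldB_ne (stop : PySem.Set String) (l : List String) : ∀ (r q : List String),
    (∀ x ∈ q, pvBadSet stop x = true) → r ≠ [] →
    r = rstrip (pvBadSet stop) (r ++ q) →
    (l.foldl (stepB stop) (r, q)).1 = rstrip (pvBadSet stop) (r ++ q ++ l) := by
  induction l with
  | nil => intro r q _ _ hrs; simpa using hrs
  | cons w l ih =>
    intro r q hq hr hrs
    by_cases hw : pvBadSet stop w = true
    · have hstep : stepB stop (r, q) w = (r, q ++ [w]) := by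
        have hre : r.isEmpty = false := by simpa [List.isEmpty_iff] using hr
        simp only [stepB]
        rw [if_pos hw, if_neg (by simp [hre])]
      have hq' : ∀ x ∈ q ++ [w], pvBadSet stop x = true := by
        intro x hx
        rcases List.mem_append.mp hx with h | h
        · exact hq x h
        · exact (List.mem_singleton.mp h) ▸ hw
      have hrs' : r = rstrip (pvBadSet stop) (r ++ (q ++ [w])) := by
        rw [← List.append_assoc, rstrip_concat, if_pos hw]; exact hrs
      rw [List.foldl_cons, hstep, ih r (q ++ [w]) hq' hr hrs']
      simp [List.append_assoc]
    · have hstep : stepB stop (r, q) w = (r ++ q ++ [w], []) := by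
        simp [stepB, hw]
      have hrs' : r ++ q ++ [w] = rstrip (pvBadSet stop) (r ++ q ++ [w] ++ []) := by
        rw [List.append_nil, rstrip_concat]; simp [hw]
      rw [List.foldl_cons, hstep, ih (r ++ q ++ [w]) [] (by simp) (by simp) hrs']
      simp [List.append_assoc]

theorem foldB_nil (stop : PySem.Set String) (l : List String) :
    (l.foldl (stepB stop) ([], [])).1
      = rstrip (pvBadSet stop) (List.dropWhile (pvBadSet stop) l) := by
  induction l with
  | nil => simp [rstrip]
  | cons w l ih =>
    by_cases hw : pvBadSet stop w = true
    · have hstep : stepB stop ([], []) w = ([], []) := by simp [stepB, hw]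
      rw [List.foldl_cons, hstep, ih, List.dropWhile_cons_of_pos hw]
    · have hstep : stepB stop ([], []) w = ([w], []) := by simp [stepB, hw]
      rw [List.foldl_cons, hstep,
        foldB_ne stop l [w] [] (by simp) (by simp)
          (by have hw' : pvBadSet stop w = false := by simpa using hw
              simp [rstrip, hw']),
        List.dropWhile_cons_of_neg (by simp [hw])]
      simp

-- ===== VERDICT (by name: the statement is the Claim_ definition above) =====
theorem strip_list_spec : Claim_equal_strip_list := by
  intro l stopwords _
  unfold Spec_strip_list strip_list_alt
  show (stripEndA stopwords ((stripEndA stopwords l).reverse)).reverse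
      = (List.foldl (stepB (PySem.Set.ofList stopwords)) ([], []) l).1
  have hpred : pvBadSet (PySem.Set.ofList stopwords) = pvBad stopwords := by
    funext w
    unfold pvBadSet pvBad
    by_cases h : w ∈ stopwords
    · rw [(PySem.Set.contains_iff _ _).mpr ((PySem.Set.mem_ofList _ _).mpr h),
        List.contains_iff_mem.mpr h]
    · have h1 : PySem.Set.contains (PySem.Set.ofList stopwords) w = false := by
        cases hc : PySem.Set.contains (PySem.Set.ofList stopwords) w
        · rfl
        · exact absurd ((PySem.Set.mem_ofList _ _).mp ((PySem.Set.contains_iff _ _).mp hc)) h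
      have h2 : stopwords.contains w = false := by
        cases hc : stopwords.contains w
        · rfl
        · exact absurd (List.contains_iff_mem.mp hc) h
      rw [h1, h2]
  rw [stripEndA_eq, stripEndA_eq, foldB_nil, hpred, ← dropWhile_rstrip_comm]
  simp [rstrip]
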